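-- pv_equiv track=rewrite | github.com/logetu/entretien | quiz1.py | calculer_score_similarite
-- ===== SOURCE A (Python) =====
-- def calculer_score_similarite(liste_gauche, liste_droite):
--     # Compter les occurrences de chaque nombre dans la liste de droite
--     occurrences_droite = {}
--     for nombre in liste_droite:
--         occurrences_droite[nombre] = occurrences_droite.get(nombre, 0) + 1
--
--     # Calculer le score de similarité
--     score = 0
--     for nombre in liste_gauche:
--         score += nombre * occurrences_droite.get(nombre, 0)
--
--     return score
-- ===== SOURCE B (Python) =====
-- def calculer_score_similarite(liste_gauche, liste_droite):
--     # Group by distinct left values: each distinct value contributes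
--     # v * (multiplicity in left) * (occurrences in right). Summing over the
--     # set is order-independent, so the result equals the per-element sum.
--     score = 0
--     for valeur in set(liste_gauche):
--         score += valeur * liste_gauche.count(valeur) * liste_droite.count(valeur)
--     return score
-- ===== Notes on version B (the rewrite author's own statement) =====
-- stated objective: alternative
-- what changed: Instead of a right-side occurrence dict and a per-element pass over liste_gauche, B iterates once over the distinct left values (set(liste_gauche)) and adds v * count_left(v) * count_right(v) per distinct value, folding duplicates into a multiplicity factor.
import Mathlib
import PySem

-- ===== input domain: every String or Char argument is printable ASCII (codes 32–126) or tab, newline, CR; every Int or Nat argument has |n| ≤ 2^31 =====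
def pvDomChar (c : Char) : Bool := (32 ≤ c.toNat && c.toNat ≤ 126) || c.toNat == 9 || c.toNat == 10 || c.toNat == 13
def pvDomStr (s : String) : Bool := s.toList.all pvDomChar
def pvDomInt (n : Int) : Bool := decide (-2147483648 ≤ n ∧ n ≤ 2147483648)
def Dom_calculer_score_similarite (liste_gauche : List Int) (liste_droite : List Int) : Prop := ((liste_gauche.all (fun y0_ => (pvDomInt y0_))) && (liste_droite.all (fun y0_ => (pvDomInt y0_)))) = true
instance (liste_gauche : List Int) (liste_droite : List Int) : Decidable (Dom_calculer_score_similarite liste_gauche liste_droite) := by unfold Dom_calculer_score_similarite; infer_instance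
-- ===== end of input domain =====

-- B replaces A's right-side occurrence dict + per-element pass by one loop over the
-- DISTINCT left values, adding v * count_left(v) * count_right(v) (alternative; not faster).

-- ===== PORT A =====
def calculer_score_similarite (liste_gauche : List Int) (liste_droite : List Int) : Int :=
  -- occurrences_droite[nombre] = occurrences_droite.get(nombre, 0) + 1
  let occurrences_droite : PySem.Dict Int Int :=
    liste_droite.foldl (fun d nombre => d.insert nombre (d.getD nombre 0 + 1)) PySem.Dict.empty
  -- score += nombre * occurrences_droite.get(nombre, 0)
  liste_gauche.foldl (fun score nombre => score + nombre * occurrences_droite.getD nombre 0) 0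

-- ===== PORT B =====
def calculer_score_similarite_alt (liste_gauche : List Int) (liste_droite : List Int) : Int :=
  -- for valeur in set(liste_gauche): score += valeur * lg.count(valeur) * ld.count(valeur)
  -- (sum over a set: order-independent, so folding Set.ofList's order is exact)
  (PySem.Set.ofList liste_gauche).foldl
    (fun score valeur =>
      score + valeur * (liste_gauche.count valeur : Int) * (liste_droite.count valeur : Int)) 0

-- ===== PRECONDITION & SPEC =====
def Spec_calculer_score_similarite (liste_gauche : List Int) (liste_droite : List Int) (out : Int) : Prop := out = calculer_score_similarite_alt liste_gauche liste_droite
instance (liste_gauche : List Int) (liste_droite : List Int) (out : Int) : Decidable (Spec_calculer_score_similarite liste_gauche liste_droite out) := by unfold Spec_calculer_score_similarite; infer_instance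

-- ===== CLAIM =====
def Claim_equal_calculer_score_similarite : Prop := ∀ (liste_gauche : List Int) (liste_droite : List Int), Dom_calculer_score_similarite liste_gauche liste_droite → Spec_calculer_score_similarite liste_gauche liste_droite (calculer_score_similarite liste_gauche liste_droite)

-- ===== LEMMAS AND PROOFS =====
theorem pv_foldl_add_map (f : Int → Int) (l : List Int) (a : Int) :
    l.foldl (fun s n => s + f n) a = a + (l.map f).sum := by
  induction l generalizing a with
  | nil => simp
  | cons x xs ih => simp [List.foldl_cons, ih (a + f x)]; ring

-- summing count(l,x) * g x over a duplicate-free list with l's members equals summing g over l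
theorem pv_sum_over_distinct (g : Int → Int) (d l : List Int)
    (hd : d.Nodup) (hm : ∀ x, x ∈ d ↔ x ∈ l) :
    (d.map (fun x => (l.count x : Int) * g x)).sum = (l.map g).sum := by
  rw [← List.sum_toFinset _ hd]
  have hfs : d.toFinset = l.toFinset := by
    ext x; simp [hm x]
  rw [hfs, Finset.sum_list_map_count]
  simp

-- ===== VERDICT =====
theorem calculer_score_similarite_spec : Claim_equal_calculer_score_similarite := by
  intro lg ld _
  unfold Spec_calculer_score_similarite calculer_score_similarite calculer_score_similarite_alt
  simp only [PySem.Dict.getD_foldl_insert_add_one, PySem.Dict.getD_empty]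
  rw [pv_foldl_add_map (fun n => n * ((0 : Int) + ld.count n)),
      pv_foldl_add_map (fun v => v * (lg.count v : Int) * (ld.count v : Int))]
  rw [← pv_sum_over_distinct (fun n => n * ((0 : Int) + ld.count n)) (PySem.Set.ofList lg) lg
        (PySem.Set.nodup_ofList lg) (fun x => PySem.Set.mem_ofList lg x)]
  simp [mul_comm, mul_assoc, mul_left_comm]
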